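-- pv_equiv track=rewrite | github.com/peterdobbs77/daily-coding | py/sample_algos/sample_algos.py | countSubarraysWithSumAndMaxAtMost
-- ===== SOURCE A (Python) =====
-- def countSubarraysWithSumAndMaxAtMost(nums, k, M):
--
--     if len(nums) > 1000000:
--         return 0
--     if k < -10**15 or k > 10**15:
--         return 0
--     if M < -10**9 or M > 10**9:
--         return 0
--
--     count = 0
--     i = 0
--     N = len(nums)
--
--     while i < N:
--         # find valid start of the subarray window
--         while i < N and nums[i] > M:
--             i += 1
--         if i >= N:
--             break
--
--         # initialize prefix sum
--         prefix_sum_ij = 0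
--         # and hashmap for collecting frequency of
--         freq = { 0: 1 }
--
--         # expand the subarray window
--         j = i
--         while j < N and nums[j] <= M:
--             prefix_sum_ij += nums[j]
--             if prefix_sum_ij - k in freq:
--                 count += freq[prefix_sum_ij - k]
--             # increment value for frequency of prefix_sum_ij
--             freq[prefix_sum_ij] = freq.get(prefix_sum_ij, 0) + 1
--             j += 1
--
--         # move on to next segment
--         i = j
--
--     return count
-- ===== SOURCE B (Python) =====
-- def _rank(lst, x):
--     # index of the first element >= x in the sorted list lst (binary search)
--     lo, hi = 0, len(lst)
--     while lo < hi:
--         mid = (lo + hi) // 2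
--         if lst[mid] < x:
--             lo = mid + 1
--         else:
--             hi = mid
--     return lo
--
--
-- def countSubarraysWithSumAndMaxAtMost(nums, k, M):
--     if len(nums) > 1000000:
--         return 0
--     if k < -10**15 or k > 10**15:
--         return 0
--     if M < -10**9 or M > 10**9:
--         return 0
--     # Stage 1: split nums into the maximal runs of elements <= M
--     segments = []
--     cur = []
--     for x in nums:
--         if x > M:
--             if cur:
--                 segments.append(cur)
--             cur = []
--         else:
--             cur.append(x)
--     if cur:
--         segments.append(cur)
--     # Stage 2: per run, build the prefix-sum list and an offline index
--     # value -> sorted positions; a subarray (i, j] with sum k is a pair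
--     # P[j] - P[i] = k with i < j, counted by a rank (binary search) query.
--     count = 0
--     for seg in segments:
--         P = [0]
--         for x in seg:
--             P.append(P[-1] + x)
--         pos = {}
--         for j, v in enumerate(P):
--             pos.setdefault(v, []).append(j)
--         for j, v in enumerate(P):
--             if j > 0:
--                 count += _rank(pos.get(v - k, []), j)
--     return count
-- ===== Notes on version B (the rewrite author's own statement) =====
-- stated objective: alternative
-- what changed: Replaces A's online nested-loop prefix-sum hashmap (frequency counter updated while scanning) by a staged offline algorithm: first split nums into the maximal runs of elements <= M, then per run build the full prefix-sum list and an offline value-to-sorted-positions index, and answer each position with a hand-written binary-search rank query.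
import Mathlib
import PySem

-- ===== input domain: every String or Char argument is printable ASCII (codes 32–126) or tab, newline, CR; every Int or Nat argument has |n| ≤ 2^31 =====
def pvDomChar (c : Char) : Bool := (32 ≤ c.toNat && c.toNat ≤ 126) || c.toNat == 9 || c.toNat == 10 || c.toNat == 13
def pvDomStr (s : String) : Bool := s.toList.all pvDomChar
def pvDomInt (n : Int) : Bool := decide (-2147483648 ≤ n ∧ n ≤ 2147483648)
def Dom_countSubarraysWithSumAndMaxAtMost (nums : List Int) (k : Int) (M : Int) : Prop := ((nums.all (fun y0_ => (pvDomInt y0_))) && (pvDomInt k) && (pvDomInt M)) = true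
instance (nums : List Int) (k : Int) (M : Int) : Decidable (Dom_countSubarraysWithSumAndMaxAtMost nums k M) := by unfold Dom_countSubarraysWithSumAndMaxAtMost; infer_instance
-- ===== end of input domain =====

-- B replaces A's online nested-loop prefix-sum hashmap by a staged offline algorithm:
-- split into maximal runs ≤ M, then per run build the prefix-sum list, an offline
-- value → sorted-positions index, and answer each position by a binary-search rank
-- query (objective: alternative algorithm, same results).

-- ===== PORT A =====
-- A's two while-loops, transliterated as mutual structural recursion on the remaining
-- suffix of nums (the index i/j advances ↔ the suffix shrinks). The inner loop's exit
-- on nums[j] > M returns to the outer loop, which immediately skips that element; that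
-- tail-call is inlined here ('inner stops, outer skips the same element') — exact.
mutual
  -- outer 'while i < N' loop, in its skipping phase ('while i < N and nums[i] > M')
  def pvAOuter (l : List Int) (k M : Int) (count : Int) : Int :=
    match l with
    | [] => count
    | x :: xs =>
      if x > M then pvAOuter xs k M count
      else
        -- segment entry: prefix_sum_ij = 0, freq = {0: 1}, then process nums[i] (= x)
        let prefix1 := 0 + x
        let freq0 : PySem.Dict Int Int := PySem.Dict.ofList [(0, 1)]
        let count1 := if freq0.contains (prefix1 - k) then count + freq0.getD (prefix1 - k) 0 else count
        pvAInner xs k M count1 prefix1 (freq0.insert prefix1 (freq0.getD prefix1 0 + 1))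
  -- inner 'while j < N and nums[j] <= M' loop
  def pvAInner (l : List Int) (k M : Int) (count prefixSum : Int) (freq : PySem.Dict Int Int) : Int :=
    match l with
    | [] => count
    | x :: xs =>
      if x > M then pvAOuter xs k M count   -- inner loop exits; outer skips this x (> M)
      else
        let p := prefixSum + x
        let count' := if freq.contains (p - k) then count + freq.getD (p - k) 0 else count
        pvAInner xs k M count' p (freq.insert p (freq.getD p 0 + 1))
end

def countSubarraysWithSumAndMaxAtMost (nums : List Int) (k : Int) (M : Int) : Int :=
  if (nums.length : Int) > 1000000 then 0
  else if k < -(10:Int)^15 ∨ k > (10:Int)^15 then 0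
  else if M < -(10:Int)^9 ∨ M > (10:Int)^9 then 0
  else pvAOuter nums k M 0

-- ===== PORT B =====
-- B's stage-1 loop body: extend the current run, or close it off at an element > M
def pvSegStep (M : Int) (st : List (List Int) × List Int) (x : Int) : List (List Int) × List Int :=
  if x > M then (if st.2 = [] then st.1 else st.1 ++ [st.2], []) else (st.1, st.2 ++ [x])

-- B's hand-written binary search _rank (lo, hi stay in [0, len]; lst[mid] is always
-- in range there, so the getD default is never read — exact)
def pvRankGo (lst : List Int) (x : Int) (lo hi : Nat) : Nat :=
  if lo < hi then
    let mid := (lo + hi) / 2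
    if lst.getD mid 0 < x then pvRankGo lst x (mid + 1) hi else pvRankGo lst x lo mid
  else lo
termination_by hi - lo
decreasing_by all_goals omega

def pvRank (lst : List Int) (x : Int) : Nat := pvRankGo lst x 0 lst.length

def countSubarraysWithSumAndMaxAtMost_alt (nums : List Int) (k : Int) (M : Int) : Int :=
  if (nums.length : Int) > 1000000 then 0
  else if k < -(10:Int)^15 ∨ k > (10:Int)^15 then 0
  else if M < -(10:Int)^9 ∨ M > (10:Int)^9 then 0
  else
    -- Stage 1: maximal runs of elements ≤ M
    let st := nums.foldl (pvSegStep M) ([], [])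
    let segments := if st.2 = [] then st.1 else st.1 ++ [st.2]
    -- Stage 2/3 per run: prefix sums, offline value → positions index, rank queries
    segments.foldl (fun count seg =>
      let P := seg.foldl (fun P x => P ++ [PySem.List.pyGetD P (-1) 0 + x]) [0]
      let pos := (PySem.List.enumerate P).foldl
        (fun (d : PySem.Dict Int (List Int)) jv => d.modify jv.2 [] (· ++ [jv.1]))
        PySem.Dict.empty
      (PySem.List.enumerate P).foldl
        (fun c jv => if jv.1 > 0 then c + (pvRank (pos.getD (jv.2 - k) []) jv.1 : Int) else c)
        count) 0

-- ===== PRECONDITION & SPEC =====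
def Spec_countSubarraysWithSumAndMaxAtMost (nums : List Int) (k : Int) (M : Int) (out : Int) : Prop := out = countSubarraysWithSumAndMaxAtMost_alt nums k M
instance (nums : List Int) (k : Int) (M : Int) (out : Int) : Decidable (Spec_countSubarraysWithSumAndMaxAtMost nums k M out) := by unfold Spec_countSubarraysWithSumAndMaxAtMost; infer_instance

-- ===== CLAIM (what is proved, stated in full; the proofs are below) =====
def Claim_equal_countSubarraysWithSumAndMaxAtMost : Prop := ∀ (nums : List Int) (k : Int) (M : Int), Dom_countSubarraysWithSumAndMaxAtMost nums k M → Spec_countSubarraysWithSumAndMaxAtMost nums k M (countSubarraysWithSumAndMaxAtMost nums k M)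

-- ===== LEMMAS AND PROOFS =====

-- the prefix-sum list [0, x0, x0+x1, …] of a run, starting at a
def pvPrefixes : List Int → Int → List Int
  | [], a => [a]
  | x :: xs, a => a :: pvPrefixes xs (a + x)

-- one step of A's inner loop, with the contains-guard already collapsed
def pvIStep (k : Int) (st : Int × Int × PySem.Dict Int Int) (x : Int) : Int × Int × PySem.Dict Int Int :=
  let p := st.2.1 + x
  (st.1 + st.2.2.getD (p - k) 0, p, st.2.2.insert p (st.2.2.getD p 0 + 1))

def pvFreq0 : PySem.Dict Int Int := PySem.Dict.ofList [(0, 1)]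

-- what A's inner loop computes on one full run (all elements ≤ M)
def pvOnlineSeg (seg : List Int) (k : Int) : Int := (seg.foldl (pvIStep k) (0, 0, pvFreq0)).1

-- the maximal ≤M-runs of a list, as structural recursion
def pvSegs (M : Int) : List Int → List (List Int)
  | [] => []
  | x :: xs =>
    if x > M then pvSegs M xs
    else (x :: xs.takeWhile (fun y => decide (y ≤ M))) :: pvSegs M (xs.dropWhile (fun y => decide (y ≤ M)))
termination_by l => l.length
decreasing_by
  all_goals have := List.length_dropWhile_le (fun y => decide (y ≤ M)) xs
  all_goals simp
  omega

-- the common reference value per run: Σ_{j>0} (#i<j with P i = P j - k), over prefix list P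
def pvMid (P : List Int) (k : Int) : Int :=
  ((PySem.List.enumerate P).map
    (fun jv => if jv.1 > 0 then ((P.take jv.1.toNat).count (jv.2 - k) : Int) else 0)).sum

-- the positions (in enumeration order) at which P carries value c
def pvIdx (P : List Int) (c : Int) : List Int :=
  ((PySem.List.enumerate P).filter (fun jv => jv.2 == c)).map (·.1)

lemma pvCount_step (freq : PySem.Dict Int Int) (count q : Int) :
    (if freq.contains q then count + freq.getD q 0 else count) = count + freq.getD q 0 := by
  by_cases h : freq.contains q = true
  · simp [h]
  · have : freq.get? q = none := by
      cases hg : freq.get? q with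
      | none => rfl
      | some v => exact absurd (by simp [PySem.Dict.contains_eq_isSome_get?, hg]) h
    simp [h, PySem.Dict.getD, this]

lemma pvFreq0_getD (v : Int) : pvFreq0.getD v 0 = ((pvPrefixes [] 0).count v : Int) := by
  have h0 : pvFreq0 = PySem.Dict.empty.insert 0 1 := by decide
  rw [h0, PySem.Dict.getD_insert]
  rcases eq_or_ne v 0 with h | h
  · simp [h, pvPrefixes]
  · simp [h, pvPrefixes, PySem.Dict.getD_empty, Ne.symm h]

-- additivity of the inner fold in its count component (state otherwise unchanged)
lemma pvIStep_add (l : List Int) (k : Int) : ∀ (c p : Int) (f : PySem.Dict Int Int),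
    (l.foldl (pvIStep k) (c, p, f)).1 = c + (l.foldl (pvIStep k) (0, p, f)).1 ∧
    (l.foldl (pvIStep k) (c, p, f)).2 = (l.foldl (pvIStep k) (0, p, f)).2 := by
  induction l with
  | nil => intro c p f; simp
  | cons x xs ih =>
    intro c p f
    simp only [List.foldl_cons, pvIStep]
    obtain ⟨h1, h2⟩ := ih (c + f.getD (p + x - k) 0) (p + x) (f.insert (p + x) (f.getD (p + x) 0 + 1))
    obtain ⟨h1', h2'⟩ := ih (0 + f.getD (p + x - k) 0) (p + x) (f.insert (p + x) (f.getD (p + x) 0 + 1))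
    exact ⟨by rw [h1, h1']; ring, by rw [h2, h2']⟩

-- A's inner loop runs through a prefix of ≤M elements as a fold
lemma pvAInner_run (a b : List Int) (k M : Int) :
    (∀ y ∈ a, ¬ y > M) → ∀ c p f,
    pvAInner (a ++ b) k M c p f =
      pvAInner b k M (a.foldl (pvIStep k) (c, p, f)).1
        (a.foldl (pvIStep k) (c, p, f)).2.1 (a.foldl (pvIStep k) (c, p, f)).2.2 := by
  induction a with
  | nil => intro _ c p f; rfl
  | cons y ys ih =>
    intro ha c p f
    have hy : ¬ y > M := ha y (List.mem_cons_self)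
    simp only [List.cons_append, pvAInner, if_neg hy, pvCount_step]
    rw [ih (fun z hz => ha z (List.mem_cons_of_mem _ hz))]
    simp only [List.foldl_cons, pvIStep]

lemma pvAOuter_segs_aux (k M : Int) : ∀ (n : Nat) (l : List Int), l.length ≤ n → ∀ c,
    pvAOuter l k M c = (pvSegs M l).foldl (fun c seg => c + pvOnlineSeg seg k) c := by
  intro n
  induction n with
  | zero =>
    intro l hl c
    have : l = [] := List.length_eq_zero_iff.mp (Nat.le_zero.mp hl)
    subst this; simp [pvAOuter, pvSegs]
  | succ n ih =>
    intro l hl c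
    match l with
    | [] => simp [pvAOuter, pvSegs]
    | x :: xs =>
      by_cases hx : x > M
      · simp only [pvAOuter, if_pos hx, pvSegs]
        exact ih xs (by simpa using Nat.le_of_succ_le_succ (by simpa using hl)) c
      · have hxle : xs.length ≤ n := by simpa using Nat.le_of_succ_le_succ (by simpa using hl)
        simp only [pvAOuter, if_neg hx]
        have hxs : xs = xs.takeWhile (fun y => decide (y ≤ M)) ++ xs.dropWhile (fun y => decide (y ≤ M)) :=
          List.takeWhile_append_dropWhile.symm
        have ha : ∀ y ∈ xs.takeWhile (fun y => decide (y ≤ M)), ¬ y > M := by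
          intro y hy
          have := List.mem_takeWhile_imp hy
          simp at this; omega
        conv_lhs => rw [hxs]
        rw [pvAInner_run _ _ k M ha]
        have hst : ((if (PySem.Dict.ofList [(0, 1)] : PySem.Dict Int Int).contains (0 + x - k) then
              c + (PySem.Dict.ofList [(0, 1)] : PySem.Dict Int Int).getD (0 + x - k) 0 else c),
              0 + x,
              (PySem.Dict.ofList [(0, 1)] : PySem.Dict Int Int).insert (0 + x)
                ((PySem.Dict.ofList [(0, 1)] : PySem.Dict Int Int).getD (0 + x) 0 + 1))
            = pvIStep k (c, 0, pvFreq0) x := by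
          simp [pvIStep, pvCount_step, pvFreq0]
        rw [hst]
        have hfold : (xs.takeWhile (fun y => decide (y ≤ M))).foldl (pvIStep k) (pvIStep k (c, 0, pvFreq0) x)
            = (x :: xs.takeWhile (fun y => decide (y ≤ M))).foldl (pvIStep k) (c, 0, pvFreq0) := rfl
        have hadd := pvIStep_add (x :: xs.takeWhile (fun y => decide (y ≤ M))) k c 0 pvFreq0
        cases hb : xs.dropWhile (fun y => decide (y ≤ M)) with
        | nil =>
          simp only [pvAInner]
          rw [hfold, hadd.1]
          simp only [pvSegs, if_neg hx, hb, List.foldl_cons, pvOnlineSeg]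
          simp
        | cons y ys =>
          have hyf : (fun y => decide (y ≤ M)) y = false := by
            have hne : xs.dropWhile (fun y => decide (y ≤ M)) ≠ [] := by rw [hb]; simp
            have h2 := List.head_dropWhile_not (fun y => decide (y ≤ M)) hne
            simpa [hb] using h2
          have hyM : y > M := by simp at hyf; omega
          have hys : ys.length ≤ n := by
            have := List.length_dropWhile_le (fun y => decide (y ≤ M)) xs
            rw [hb] at this; simp at this; omega
          simp only [pvAInner, if_pos hyM]
          rw [ih ys hys]
          rw [hfold, hadd.1]
          simp only [pvSegs, if_neg hx, hb, if_pos hyM, List.foldl_cons, pvOnlineSeg]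

-- A's loops = sum of the online per-run counts over the maximal runs
lemma pvAOuter_segs (l : List Int) (k M : Int) : ∀ c,
    pvAOuter l k M c = (pvSegs M l).foldl (fun c seg => c + pvOnlineSeg seg k) c :=
  pvAOuter_segs_aux k M l.length l (le_refl _)

-- the finalization of B's stage-1 state
def pvFin (st : List (List Int) × List Int) : List (List Int) :=
  if st.2 = [] then st.1 else st.1 ++ [st.2]

lemma pvStage1_aux (M : Int) (l : List Int) :
    (∀ segs0, pvFin (l.foldl (pvSegStep M) (segs0, [])) = segs0 ++ pvSegs M l) ∧
    (∀ segs0 cur, cur ≠ [] →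
      pvFin (l.foldl (pvSegStep M) (segs0, cur)) =
        segs0 ++ (cur ++ l.takeWhile (fun y => decide (y ≤ M))) ::
          pvSegs M (l.dropWhile (fun y => decide (y ≤ M)))) := by
  induction l with
  | nil => exact ⟨fun segs0 => by simp [pvFin, pvSegs], fun segs0 cur hc => by simp [pvFin, pvSegs, hc]⟩
  | cons x xs ih =>
    constructor
    · intro segs0
      by_cases hx : x > M
      · simp only [List.foldl_cons, pvSegStep, if_pos hx]
        simp only [ih.1, pvSegs, if_pos hx]
        simp
      · simp only [List.foldl_cons, pvSegStep, if_neg hx]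
        rw [ih.2 segs0 ([] ++ [x]) (by simp)]
        simp only [pvSegs, if_neg hx, List.nil_append, List.cons_append, List.nil_append]
    · intro segs0 cur hc
      by_cases hx : x > M
      · simp only [List.foldl_cons, pvSegStep, if_pos hx, if_neg hc]
        rw [ih.1]
        have ht : (x :: xs).takeWhile (fun y => decide (y ≤ M)) = [] := by
          simp [List.takeWhile_cons]; omega
        have hd : (x :: xs).dropWhile (fun y => decide (y ≤ M)) = x :: xs := by
          simp [List.dropWhile_cons]; omega
        rw [ht, hd]
        simp [pvSegs, if_pos hx]
      · simp only [List.foldl_cons, pvSegStep, if_neg hx]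
        rw [ih.2 segs0 (cur ++ [x]) (by simp)]
        have ht : (x :: xs).takeWhile (fun y => decide (y ≤ M))
            = x :: xs.takeWhile (fun y => decide (y ≤ M)) := by
          simp [List.takeWhile_cons]; omega
        have hd : (x :: xs).dropWhile (fun y => decide (y ≤ M))
            = xs.dropWhile (fun y => decide (y ≤ M)) := by
          simp [List.dropWhile_cons]; omega
        rw [ht, hd]
        simp

-- B's stage-1 fold computes pvSegs
lemma pvStage1_segs (M : Int) (l : List Int) :
    (if (l.foldl (pvSegStep M) ([], [])).2 = [] then (l.foldl (pvSegStep M) ([], [])).1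
     else (l.foldl (pvSegStep M) ([], [])).1 ++ [(l.foldl (pvSegStep M) ([], [])).2]) = pvSegs M l := by
  have := (pvStage1_aux M l).1 []
  simpa [pvFin] using this

-- B's prefix fold computes pvPrefixes
lemma pvPref_fold_aux (seg : List Int) : ∀ (pre : List Int) (a : Int),
    seg.foldl (fun P x => P ++ [PySem.List.pyGetD P (-1) 0 + x]) (pre ++ [a]) = pre ++ pvPrefixes seg a := by
  induction seg with
  | nil => intro pre a; simp [pvPrefixes]
  | cons x xs ih =>
    intro pre a
    simp only [List.foldl_cons, PySem.List.pyGetD_neg_one_append_singleton]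
    have : pre ++ [a] ++ [a + x] = (pre ++ [a]) ++ [a + x] := by simp
    rw [this, ih (pre ++ [a]) (a + x)]
    simp [pvPrefixes]

lemma pvPref_fold (seg : List Int) :
    seg.foldl (fun P x => P ++ [PySem.List.pyGetD P (-1) 0 + x]) [0] = pvPrefixes seg 0 := by
  simpa using pvPref_fold_aux seg [] 0

-- B's grouping dict: looking up c yields the positions of value c, in order
lemma pvPos_getD (P : List Int) (c : Int) :
    ((PySem.List.enumerate P).foldl
      (fun (d : PySem.Dict Int (List Int)) jv => d.modify jv.2 [] (· ++ [jv.1]))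
      PySem.Dict.empty).getD c [] = pvIdx P c := by
  rw [show ((PySem.List.enumerate P).foldl
      (fun (d : PySem.Dict Int (List Int)) jv => d.modify jv.2 [] (· ++ [jv.1]))
      PySem.Dict.empty)
    = (((PySem.List.enumerate P).map (fun jv => (jv.2, jv.1))).foldl
      (fun (d : PySem.Dict Int (List Int)) p => d.modify p.1 [] (· ++ [p.2]))
      PySem.Dict.empty) by rw [List.foldl_map]]
  rw [PySem.Dict.getD_foldl_modify_append]
  simp [pvIdx, List.filter_map, List.map_map, Function.comp_def]

lemma pvIdx_sorted (P : List Int) (c : Int) : (pvIdx P c).Pairwise (· ≤ ·) := by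
  unfold pvIdx
  rw [List.pairwise_map]
  exact ((PySem.List.pairwise_lt_enumerate P 0).filter _).imp (fun h => le_of_lt h)

-- in a sorted list, being < x is being below countP (< x)
lemma pvSorted_lt_iff (lst : List Int) (x : Int) (h : lst.Pairwise (· ≤ ·)) :
    ∀ m (hm : m < lst.length),
      (lst[m] < x ↔ m < lst.countP (fun y => decide (y < x))) := by
  induction lst with
  | nil => intro m hm; simp at hm
  | cons a tl ih =>
    rw [List.pairwise_cons] at h
    intro m hm
    rw [List.countP_cons]
    by_cases hax : a < x
    · match m with
      | 0 => simp [hax]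
      | Nat.succ m' =>
        have := ih h.2 m' (by simpa using Nat.lt_of_succ_lt_succ hm)
        simp only [List.getElem_cons_succ, hax]
        simpa using this
    · have htl : tl.countP (fun y => decide (y < x)) = 0 := by
        apply List.countP_eq_zero.mpr
        intro b hb
        have := h.1 b hb
        simp; omega
      match m with
      | 0 => simp [hax, htl]
      | Nat.succ m' =>
        have hm' : m' < tl.length := by simpa using Nat.lt_of_succ_lt_succ hm
        have hb := h.1 tl[m'] (List.getElem_mem hm')
        simp [hax, htl]; omega

lemma pvRankGo_eq (lst : List Int) (x : Int) (c : Nat)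
    (hc : ∀ m (hm : m < lst.length), (lst[m] < x ↔ m < c)) :
    ∀ n lo hi, hi - lo = n → lo ≤ c → c ≤ hi → hi ≤ lst.length → pvRankGo lst x lo hi = c := by
  intro n
  induction n using Nat.strong_induction_on with
  | _ n ih =>
    intro lo hi hn h1 h2 h3
    rw [pvRankGo]
    by_cases hlh : lo < hi
    · simp only [if_pos hlh]
      have hmid1 : lo ≤ (lo + hi) / 2 := by omega
      have hmid2 : (lo + hi) / 2 < hi := by omega
      have hmlen : (lo + hi) / 2 < lst.length := by omega
      rw [List.getD_eq_getElem lst 0 hmlen]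
      by_cases hv : lst[(lo + hi) / 2] < x
      · have hcm : (lo + hi) / 2 < c := (hc _ hmlen).mp hv
        simp only [if_pos hv]
        exact ih (hi - ((lo + hi) / 2 + 1)) (by omega) _ _ rfl (by omega) h2 h3
      · have hcm : c ≤ (lo + hi) / 2 := by
          by_contra hcon
          exact hv ((hc _ hmlen).mpr (by omega))
        simp only [if_neg hv]
        exact ih ((lo + hi) / 2 - lo) (by omega) _ _ rfl h1 hcm (by omega)
    · simp only [if_neg hlh]
      omega

lemma pvRank_sorted (lst : List Int) (x : Int) (h : lst.Pairwise (· ≤ ·)) :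
    pvRank lst x = lst.countP (fun y => decide (y < x)) := by
  exact pvRankGo_eq lst x _ (pvSorted_lt_iff lst x h) lst.length 0 lst.length rfl
    (Nat.zero_le _) List.countP_le_length (le_refl _)

lemma pvEnum_fst_ge {α : Type} (xs : List α) (s : Int) :
    ∀ jv ∈ PySem.List.enumerate xs s, s ≤ jv.1 := by
  intro jv hjv
  rcases (PySem.List.mem_enumerate_iff xs s jv).mp hjv with ⟨k', hk', rfl⟩
  simp

-- rank queries against the position index count occurrences in the take-prefix
lemma pvIdx_countP (P : List Int) (c : Int) : ∀ (jn : Nat) (s : Int),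
    (((PySem.List.enumerate P s).filter (fun jv => jv.2 == c)).map (·.1)).countP
      (fun t => decide (t < s + jn)) = (P.take jn).count c := by
  induction P with
  | nil => intro jn s; simp
  | cons v tl ih =>
    intro jn s
    rw [PySem.List.enumerate_cons]
    match jn with
    | 0 =>
      simp only [List.take_zero, List.count_nil]
      apply List.countP_eq_zero.mpr
      intro t ht
      simp only [List.mem_map, List.mem_filter] at ht
      obtain ⟨jv, ⟨hmem, _⟩, rfl⟩ := ht
      rcases List.mem_cons.mp hmem with h | h
      · subst h; simp
      · have := pvEnum_fst_ge tl (s + 1) jv h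
        simp; omega
    | Nat.succ m =>
      have hpred : (fun t : Int => decide (t < s + ((Nat.succ m : Nat) : Int)))
          = (fun t : Int => decide (t < (s + 1) + (m : Int))) := by
        funext t
        have : s + ((Nat.succ m : Nat) : Int) = (s + 1) + (m : Int) := by push_cast; ring
        rw [this]
      by_cases hvc : v = c
      · simp only [List.filter_cons, hvc, beq_self_eq_true, if_pos, List.map_cons, List.countP_cons,
          List.take_succ_cons, List.count_cons_self]
        rw [hpred, ih m (s + 1)]
        have hd : decide (s < s + ((Nat.succ m : Nat) : Int)) = true := by simp
        rw [hd]
        simp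
      · have hbeq : (v == c) = false := by simpa using hvc
        have hf : List.filter (fun jv => jv.2 == c) ((s, v) :: PySem.List.enumerate tl (s + 1))
            = List.filter (fun jv => jv.2 == c) (PySem.List.enumerate tl (s + 1)) := by
          simp [hbeq]
        rw [hf, hpred, ih m (s + 1), List.take_succ_cons, List.count_cons]
        simp [hvc]

-- appending one prefix value to pvMid
lemma pvPrefixes_append (l : List Int) (x : Int) : ∀ a,
    pvPrefixes (l ++ [x]) a = pvPrefixes l a ++ [a + l.sum + x] := by
  induction l with
  | nil => intro a; simp [pvPrefixes]
  | cons y ys ih =>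
    intro a
    simp only [List.cons_append, pvPrefixes, ih (a + y), List.sum_cons, List.cons_append]
    congr 3
    ring

lemma pvMid_append (P : List Int) (a k : Int) (hP : P ≠ []) :
    pvMid (P ++ [a]) k = pvMid P k + (P.count (a - k) : Int) := by
  unfold pvMid
  rw [PySem.List.enumerate_append, List.map_append, List.sum_append]
  congr 1
  · congr 1
    apply List.map_congr_left
    intro jv hjv
    rcases (PySem.List.mem_enumerate_iff P 0 jv).mp hjv with ⟨k', hk', rfl⟩
    simp only []
    by_cases hpos : ((0 : Int) + k') > 0
    · rw [if_pos hpos, if_pos hpos]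
      have htn : ((0 : Int) + k').toNat = k' := by omega
      rw [htn, List.take_append_of_le_length (le_of_lt hk')]
    · rw [if_neg hpos, if_neg hpos]
  · have hlen : ((0 : Int) + P.length) > 0 := by
      have : 0 < P.length := List.length_pos_of_ne_nil hP
      omega
    have htn : ((0 : Int) + P.length).toNat = P.length := by omega
    simp only [PySem.List.enumerate, List.map_cons, List.map_nil, List.sum_cons, List.sum_nil,
      if_pos hlen, htn]
    rw [List.take_left]
    simp

-- A's online per-run count equals the reference value pvMid
lemma pvOnline_state (seg : List Int) (k : Int) :
    (seg.foldl (pvIStep k) (0, 0, pvFreq0)).1 = pvMid (pvPrefixes seg 0) k ∧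
    (seg.foldl (pvIStep k) (0, 0, pvFreq0)).2.1 = seg.sum ∧
    ∀ v, (seg.foldl (pvIStep k) (0, 0, pvFreq0)).2.2.getD v 0 = ((pvPrefixes seg 0).count v : Int) := by
  induction seg using List.reverseRecOn with
  | nil =>
    refine ⟨?_, rfl, pvFreq0_getD⟩
    simp [pvPrefixes, pvMid, PySem.List.enumerate]
  | append_singleton seg x ih =>
    obtain ⟨ih1, ih2, ih3⟩ := ih
    have hPne : pvPrefixes seg 0 ≠ [] := by
      cases seg <;> simp [pvPrefixes]
    have hpref : pvPrefixes (seg ++ [x]) 0 = pvPrefixes seg 0 ++ [seg.sum + x] := by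
      rw [pvPrefixes_append]
      simp
    rw [List.foldl_append]
    simp only [List.foldl_cons, List.foldl_nil, pvIStep]
    refine ⟨?_, ?_, ?_⟩
    · rw [ih1, ih2, ih3, hpref, pvMid_append _ _ _ hPne]
    · rw [ih2]; simp
    · intro v
      rw [ih2, PySem.Dict.getD_insert, hpref]
      by_cases hv : v = seg.sum + x
      · rw [if_pos hv, ih3, hv]
        simp
      · rw [if_neg hv, ih3]
        rw [List.count_append]
        have : [seg.sum + x].count v = 0 := by
          simp [List.count_singleton]
          exact fun h => (hv h.symm).elim
        rw [this]
        simp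

-- B's stage-3 fold equals the reference value pvMid
lemma pvStage3_mid (seg : List Int) (k : Int) (c : Int) :
    (let P := seg.foldl (fun P x => P ++ [PySem.List.pyGetD P (-1) 0 + x]) [0]
     let pos := (PySem.List.enumerate P).foldl
       (fun (d : PySem.Dict Int (List Int)) jv => d.modify jv.2 [] (· ++ [jv.1]))
       PySem.Dict.empty
     (PySem.List.enumerate P).foldl
       (fun c jv => if jv.1 > 0 then c + (pvRank (pos.getD (jv.2 - k) []) jv.1 : Int) else c)
       c) = c + pvMid (pvPrefixes seg 0) k := by
  simp only [pvPref_fold]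
  refine Eq.trans (PySem.List.foldl_congr_mem _ _
      (fun acc jv => acc +
        (if jv.1 > 0 then (((pvPrefixes seg 0).take jv.1.toNat).count (jv.2 - k) : Int) else 0))
      c ?_) ?_
  · intro acc jv hjv
    dsimp only
    by_cases hpos : jv.1 > 0
    · rw [if_pos hpos, if_pos hpos]
      congr 1
      rw [pvPos_getD, pvRank_sorted _ _ (pvIdx_sorted _ _)]
      have hpred : ((0:Int) + (jv.1.toNat : Int)) = jv.1 := by omega
      have hcnt := pvIdx_countP (pvPrefixes seg 0) (jv.2 - k) jv.1.toNat 0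
      rw [hpred] at hcnt
      rw [pvIdx]
      exact congrArg _ hcnt
    · rw [if_neg hpos, if_neg hpos]; simp
  · rw [PySem.List.foldl_add]
    rfl

-- ===== VERDICT (by name: the statement is the Claim_ definition above) =====
theorem countSubarraysWithSumAndMaxAtMost_spec : Claim_equal_countSubarraysWithSumAndMaxAtMost := by
  intro nums k M _
  unfold Spec_countSubarraysWithSumAndMaxAtMost countSubarraysWithSumAndMaxAtMost
    countSubarraysWithSumAndMaxAtMost_alt
  split_ifs with h1 h2 h3
  · rfl
  · rfl
  · rfl
  · simp only []
    rw [pvStage1_segs, pvAOuter_segs]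
    refine PySem.List.foldl_congr_mem _ _ _ _ ?_
    intro acc seg _
    rw [pvStage3_mid, pvOnlineSeg, (pvOnline_state seg k).1]
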